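-- pv_equiv track=rewrite | github.com/Paulocp02/automata | Proyecto.py | AutoNumeroReal
-- ===== SOURCE A (Python) =====
-- def AutoNumeroReal(entrada):
--     estado = 1
--     conta = 0
--     while conta < len(entrada):
--         cadena = entrada[conta]
--
--         if estado == 1:
--             if cadena.isdigit():
--                 estado = 2
--             elif cadena =="-" or cadena =="+":
--                 estado = 2
--             else:
--                 return False
--
--         elif estado == 2:
--             if cadena.isdigit():
--                 estado = 2
--             elif cadena == '.' or cadena == ',':
--                 estado = 3
--             elif cadena == 'E':
--                 estado = 5
--             else:
--                 return False
--
--         elif estado == 3: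
--             if cadena.isdigit():
--                 estado = 4
--
--             else:
--                 return False
--
--         elif estado ==4:
--             if cadena.isdigit():
--                 estado = 4
--             elif cadena == 'E':
--                 estado = 5
--             else:
--                 return False
--
--         elif estado == 5:
--             if cadena.isdigit():
--                 estado = 7
--             elif cadena =="-" or cadena =="+":
--                 estado = 6
--             else:
--                 return False
--
--         elif estado == 6:
--             if cadena.isdigit():
--                 estado = 7
--
--             else:
--                 return False
--
--         elif estado == 7:
--             if cadena.isdigit():
--                 estado = 7
--
--             else:
--                 return False
--
--         conta += 1
--
--     return estado in [2, 4, 7]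
-- ===== SOURCE B (Python) =====
-- def AutoNumeroReal(entrada):
--     n = len(entrada)
--     if n == 0 or not (entrada[0].isdigit() or entrada[0] in '+-'):
--         return False
--     i = 1
--     while i < n and entrada[i].isdigit():
--         i += 1
--     if i < n and entrada[i] in '.,':
--         i += 1
--         if not (i < n and entrada[i].isdigit()):
--             return False
--         i += 1
--         while i < n and entrada[i].isdigit():
--             i += 1
--     if i == n:
--         return True
--     if entrada[i] != 'E':
--         return False
--     i += 1
--     if i < n and entrada[i] in '+-':
--         i += 1
--     if not (i < n and entrada[i].isdigit()):
--         return False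
--     i += 1
--     while i < n and entrada[i].isdigit():
--         i += 1
--     return i == n
-- ===== Notes on version B (the rewrite author's own statement) =====
-- stated objective: simpler
-- what changed: Replaced the explicit DFA with a numbered state variable and one big branch table by a sequential phase parser (leading sign/digit, digit run, optional '.'/',' fraction, optional 'E' exponent) that advances an index through each phase in order.
import Mathlib
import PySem

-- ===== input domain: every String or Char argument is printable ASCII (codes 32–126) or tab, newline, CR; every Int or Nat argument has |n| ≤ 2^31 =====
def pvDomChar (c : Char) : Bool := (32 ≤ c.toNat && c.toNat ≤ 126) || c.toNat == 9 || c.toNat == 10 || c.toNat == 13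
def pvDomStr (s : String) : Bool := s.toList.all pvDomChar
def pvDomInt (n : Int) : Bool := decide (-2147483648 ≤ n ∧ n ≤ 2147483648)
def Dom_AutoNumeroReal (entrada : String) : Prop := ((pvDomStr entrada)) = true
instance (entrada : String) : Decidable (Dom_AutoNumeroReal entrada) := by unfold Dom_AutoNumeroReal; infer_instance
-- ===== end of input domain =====

-- B replaces A's explicit DFA state variable by a sequential phase parser (sign/digits, optional fraction, optional exponent); objective: simpler.


-- ===== PORT A =====
-- the while loop: state 'estado', one character per step, early 'return False' branches
def pvRunA (estado : Nat) (l : List Char) : Bool :=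
  match l with
  | [] => decide (estado = 2) || decide (estado = 4) || decide (estado = 7)
  | cadena :: rest =>
    if estado = 1 then
      if PySem.Chars.isdigit cadena then pvRunA 2 rest
      else if cadena == '-' || cadena == '+' then pvRunA 2 rest
      else false
    else if estado = 2 then
      if PySem.Chars.isdigit cadena then pvRunA 2 rest
      else if cadena == '.' || cadena == ',' then pvRunA 3 rest
      else if cadena == 'E' then pvRunA 5 rest
      else false
    else if estado = 3 then
      if PySem.Chars.isdigit cadena then pvRunA 4 rest else false
    else if estado = 4 then
      if PySem.Chars.isdigit cadena then pvRunA 4 rest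
      else if cadena == 'E' then pvRunA 5 rest
      else false
    else if estado = 5 then
      if PySem.Chars.isdigit cadena then pvRunA 7 rest
      else if cadena == '-' || cadena == '+' then pvRunA 6 rest
      else false
    else if estado = 6 then
      if PySem.Chars.isdigit cadena then pvRunA 7 rest else false
    else if estado = 7 then
      if PySem.Chars.isdigit cadena then pvRunA 7 rest else false
    else pvRunA estado rest

def AutoNumeroReal (entrada : String) : Bool := pvRunA 1 entrada.toList

-- ===== PORT B =====
-- 'while i < n and entrada[i].isdigit(): i += 1'
def pvSkipDigits (l : List Char) : List Char :=
  match l with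
  | [] => []
  | c :: r => if PySem.Chars.isdigit c then pvSkipDigits r else c :: r

-- optional fraction phase: '.'/',' must be followed by at least one digit; none = return False
def pvFracPart (l : List Char) : Option (List Char) :=
  match l with
  | [] => some []
  | c :: r =>
    if c == '.' || c == ',' then
      match r with
      | [] => none
      | d :: r2 => if PySem.Chars.isdigit d then some (pvSkipDigits r2) else none
    else some (c :: r)

-- after 'E': optional sign, then at least one digit, then digits to the end
def pvExpTail (l : List Char) : Bool :=
  match (match l with
         | [] => ([] : List Char)
         | s :: r => if s == '+' || s == '-' then r else s :: r) with
  | [] => false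
  | d :: r2 => if PySem.Chars.isdigit d then (pvSkipDigits r2).isEmpty else false

-- 'if i == n: return True; if entrada[i] != 'E': return False; …'
def pvAfterMant (l : List Char) : Bool :=
  match l with
  | [] => true
  | c :: r => if c == 'E' then pvExpTail r else false

def AutoNumeroReal_alt (entrada : String) : Bool :=
  match entrada.toList with
  | [] => false
  | c :: r =>
    if PySem.Chars.isdigit c || c == '+' || c == '-' then
      match pvFracPart (pvSkipDigits r) with
      | none => false
      | some l2 => pvAfterMant l2
    else false

-- ===== PRECONDITION & SPEC =====
def Spec_AutoNumeroReal (entrada : String) (out : Bool) : Prop := out = AutoNumeroReal_alt entrada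
instance (entrada : String) (out : Bool) : Decidable (Spec_AutoNumeroReal entrada out) := by unfold Spec_AutoNumeroReal; infer_instance

-- ===== CLAIM (what is proved, stated in full; the proofs are below) =====
def Claim_equal_AutoNumeroReal : Prop := ∀ (entrada : String), Dom_AutoNumeroReal entrada → Spec_AutoNumeroReal entrada (AutoNumeroReal entrada)

-- ===== LEMMAS AND PROOFS =====

-- state 7 accepts exactly when only digits remain
theorem pvRunA_seven (l : List Char) : pvRunA 7 l = (pvSkipDigits l).isEmpty := by
  induction l with
  | nil => rfl
  | cons c r ih =>
    by_cases h : PySem.Chars.isdigit c = true <;>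
      simp [pvRunA, pvSkipDigits, h, ih]

-- state 5 is B's exponent-tail check
theorem pvRunA_five (l : List Char) : pvRunA 5 l = pvExpTail l := by
  cases l with
  | nil => rfl
  | cons c r =>
    by_cases hd : PySem.Chars.isdigit c = true
    · have hdig := hd
      simp only [PySem.Chars.isdigit, Bool.and_eq_true, decide_eq_true_eq] at hdig
      have hs : (c == '+' || c == '-') = false := by
        simp only [Bool.or_eq_false_iff, beq_eq_false_iff_ne, ne_eq]
        constructor <;> rintro rfl <;> exact absurd hdig.1 (by decide)
      cases r with
      | nil => simp [pvRunA, pvExpTail, pvSkipDigits, hd, hs]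
      | cons d r2 =>
        by_cases hd2 : PySem.Chars.isdigit d = true <;>
          simp [pvRunA, pvExpTail, pvSkipDigits, hd, hs, hd2, pvRunA_seven]
    · by_cases hs : (c == '-' || c == '+') = true
      · have hs' : (c == '+' || c == '-') = true := by
          revert hs; simp; tauto
        cases r with
        | nil => simp [pvRunA, pvExpTail, hd, hs, hs']
        | cons d r2 =>
          by_cases hd2 : PySem.Chars.isdigit d = true <;>
            simp [pvRunA, pvExpTail, hd, hs, hs', hd2, pvRunA_seven]
      · have hs' : (c == '+' || c == '-') = false := by
          revert hs; simp; tauto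
        simp [pvRunA, pvExpTail, hd, hs, hs']

-- state 4 = B's epilogue after the fraction: skip digits, then optional exponent
theorem pvRunA_four (l : List Char) : pvRunA 4 l = pvAfterMant (pvSkipDigits l) := by
  induction l with
  | nil => rfl
  | cons c r ih =>
    by_cases hd : PySem.Chars.isdigit c = true
    · simpa [pvRunA, pvSkipDigits, hd] using ih
    · by_cases hE : (c == 'E') = true
      · simp [pvRunA, pvSkipDigits, pvAfterMant, hd, hE, pvRunA_five]
      · simp [pvRunA, pvSkipDigits, pvAfterMant, hd, hE]

-- state 2 = B's whole mantissa-and-rest processing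
theorem pvRunA_two (l : List Char) :
    pvRunA 2 l = (match pvFracPart (pvSkipDigits l) with
                  | none => false
                  | some l2 => pvAfterMant l2) := by
  induction l with
  | nil => rfl
  | cons c r ih =>
    by_cases hd : PySem.Chars.isdigit c = true
    · simpa [pvRunA, pvSkipDigits, hd] using ih
    · by_cases hdot : (c == '.' || c == ',') = true
      · have hE : (c == 'E') = false := by
          revert hdot; simp; rintro (rfl | rfl) <;> decide
        cases r with
        | nil => simp [pvRunA, pvSkipDigits, pvFracPart, hd, hdot]
        | cons d r2 =>
          by_cases hd2 : PySem.Chars.isdigit d = true <;>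
            simp [pvRunA, pvSkipDigits, pvFracPart, hd, hdot, hd2, pvRunA_four]
      · by_cases hE : (c == 'E') = true
        · have : c = 'E' := by revert hE; simp
          subst this
          simp [pvRunA, pvSkipDigits, pvFracPart, pvAfterMant, hd, pvRunA_five]
        · simp [pvRunA, pvSkipDigits, pvFracPart, pvAfterMant, hd, hdot, hE]

-- ===== VERDICT (by name: the statement is the Claim_ definition above) =====
theorem AutoNumeroReal_spec : Claim_equal_AutoNumeroReal := by
  intro entrada _
  unfold Spec_AutoNumeroReal AutoNumeroReal AutoNumeroReal_alt
  cases h : entrada.toList with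
  | nil => simp [pvRunA]
  | cons c r =>
    by_cases hd : PySem.Chars.isdigit c = true
    · simp [pvRunA, hd, pvRunA_two]
    · by_cases hs : (c == '-' || c == '+') = true
      · have hc : c = '-' ∨ c = '+' := by simpa using hs
        rcases hc with rfl | rfl
        · simp [pvRunA, pvRunA_two, PySem.Chars.isdigit]
        · simp [pvRunA, pvRunA_two, PySem.Chars.isdigit]
      · have hs' := hs
        simp only [Bool.or_eq_true, beq_iff_eq, not_or] at hs'
        simp [pvRunA, hd, hs'.1, hs'.2]
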